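-- pv_equiv track=rewrite | github.com/nelsonlai/freelance | leetcode/leetcode_problems/codes/2042_check-if-numbers-are-ascending-in-a-sentence/python3.py | areNumbersAscending
-- ===== SOURCE A (Python) =====
-- def areNumbersAscending(s: str) -> bool:
--     words = s.split()
--     numbers = []
--
--     for word in words:
--         if word.isdigit():
--             numbers.append(int(word))
--
--     for i in range(1, len(numbers)):
--         if numbers[i] <= numbers[i - 1]:
--             return False
--
--     return True
-- ===== SOURCE B (Python) =====
-- def areNumbersAscending(s: str) -> bool:
--     nums = [int(w) for w in s.split() if w.isdigit()]
--     return len(set(nums)) == len(nums) and sorted(nums) == nums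
-- ===== Notes on version B (the rewrite author's own statement) =====
-- stated objective: alternative
-- what changed: Replaces A's adjacent-pair scan over an appended list by a global order check: the extracted numbers are strictly ascending iff they equal their own sorted order and contain no duplicates (len(set(nums)) == len(nums)).
import Mathlib
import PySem

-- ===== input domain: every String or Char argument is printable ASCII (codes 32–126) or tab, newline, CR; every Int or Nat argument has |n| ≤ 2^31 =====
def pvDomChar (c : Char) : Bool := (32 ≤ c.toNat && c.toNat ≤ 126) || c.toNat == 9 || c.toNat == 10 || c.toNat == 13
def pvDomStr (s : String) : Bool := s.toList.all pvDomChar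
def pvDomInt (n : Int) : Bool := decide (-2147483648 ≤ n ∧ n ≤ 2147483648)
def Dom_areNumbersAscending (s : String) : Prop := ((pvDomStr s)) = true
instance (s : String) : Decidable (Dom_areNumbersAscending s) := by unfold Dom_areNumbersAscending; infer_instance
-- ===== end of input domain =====

-- B checks global order instead of adjacent pairs: the extracted numbers are strictly ascending
-- iff they equal their own sorted order and have no duplicates (alternative algorithm; same return value).

-- ===== PORT A =====
-- first loop: numbers.append(int(word)) for the digit words
def pvNumbersA (words : List String) : List Int :=
  words.foldl (fun acc w =>
    if PySem.Str.strIsdigit w then acc ++ [(PySem.Int.ofStr? w).getD 0] else acc) []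

-- second loop: for i in range(1, len(numbers)) with early 'return False'
def pvLoopA : List Int → List Int → Bool
  | [], _ => true
  | i :: rest, nums =>
    if PySem.List.pyGetD nums i 0 ≤ PySem.List.pyGetD nums (i - 1) 0 then false
    else pvLoopA rest nums

def areNumbersAscending (s : String) : Bool :=
  let words := PySem.Str.split₀ s
  let numbers := pvNumbersA words
  pvLoopA (PySem.List.pyRange 1 (numbers.length : Int) 1) numbers

-- ===== PORT B =====
-- nums = [int(w) for w in s.split() if w.isdigit()]
def pvNumsB (s : String) : List Int :=
  ((PySem.Str.split₀ s).filter (fun w => PySem.Str.strIsdigit w)).map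
    (fun w => (PySem.Int.ofStr? w).getD 0)

-- return len(set(nums)) == len(nums) and sorted(nums) == nums
def areNumbersAscending_alt (s : String) : Bool :=
  let nums := pvNumsB s
  decide ((PySem.Set.ofList nums).length = nums.length) &&
    decide (PySem.List.sorted nums (fun x => x) = nums)

-- ===== PRECONDITION & SPEC =====
def Spec_areNumbersAscending (s : String) (out : Bool) : Prop := out = areNumbersAscending_alt s
instance (s : String) (out : Bool) : Decidable (Spec_areNumbersAscending s out) := by unfold Spec_areNumbersAscending; infer_instance

-- ===== CLAIM (what is proved, stated in full; the proofs are below) =====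
def Claim_equal_areNumbersAscending : Prop := ∀ (s : String), Dom_areNumbersAscending s → Spec_areNumbersAscending s (areNumbersAscending s)

-- ===== LEMMAS AND PROOFS =====

-- adjacent-pairs strict-ascent check (characterises A's second loop)
def pvChain : List Int → Bool
  | [] => true
  | [_] => true
  | x :: y :: t => if y ≤ x then false else pvChain (y :: t)

lemma pvChain_short (nums : List Int) (h : nums.length ≤ 1) : pvChain nums = true := by
  match nums with
  | [] => rfl
  | [_] => rfl
  | _ :: _ :: _ => simp at h

lemma pvLoopA_drop : ∀ (m k : Nat) (nums : List Int), nums.length - (k + 1) = m →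
    pvLoopA (PySem.List.pyRange ((k : Int) + 1) (nums.length : Int) 1) nums = pvChain (nums.drop k) := by
  intro m
  induction m with
  | zero =>
    intro k nums hm
    by_cases hlt : k + 1 < nums.length
    · omega
    · have hle : (nums.length : Int) ≤ (k : Int) + 1 := by exact_mod_cast Nat.not_lt.mp hlt
      rw [PySem.List.pyRange_one_eq_nil hle]
      have : (nums.drop k).length ≤ 1 := by simp; omega
      rw [pvChain_short _ this]; rfl
  | succ m ih =>
    intro k nums hm
    have hlt : k + 1 < nums.length := by omega
    have hltI : (k : Int) + 1 < (nums.length : Int) := by exact_mod_cast hlt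
    rw [PySem.List.pyRange_one_cons hltI]
    have hk1 : ((k : Int) + 1) = ((k + 1 : Nat) : Int) := by push_cast; ring
    have hgetk1 : PySem.List.pyGetD nums ((k : Int) + 1) 0 = nums.getD (k + 1) 0 := by
      rw [hk1, PySem.List.pyGetD_natCast]
    have hgetk : PySem.List.pyGetD nums ((k : Int) + 1 - 1) 0 = nums.getD k 0 := by
      have : (k : Int) + 1 - 1 = (k : Int) := by ring
      rw [this, PySem.List.pyGetD_natCast]
    have hdk : nums.drop k = nums[k] :: nums.drop (k + 1) :=
      List.drop_eq_getElem_cons (by omega)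
    have hdk1 : nums.drop (k + 1) = nums[k + 1] :: nums.drop (k + 2) :=
      List.drop_eq_getElem_cons (by omega)
    have hgdk : nums.getD k 0 = nums[k] := List.getD_eq_getElem nums 0 (by omega)
    have hgdk1 : nums.getD (k + 1) 0 = nums[k + 1] := List.getD_eq_getElem nums 0 (by omega)
    show (if PySem.List.pyGetD nums ((k : Int) + 1) 0 ≤ PySem.List.pyGetD nums ((k : Int) + 1 - 1) 0
          then false else pvLoopA (PySem.List.pyRange ((k : Int) + 1 + 1) (nums.length : Int) 1) nums)
        = pvChain (nums.drop k)
    rw [hgetk1, hgetk, hgdk, hgdk1, hdk, hdk1]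
    show (if nums[k + 1] ≤ nums[k] then false
          else pvLoopA (PySem.List.pyRange ((k : Int) + 1 + 1) (nums.length : Int) 1) nums)
        = pvChain (nums[k] :: nums[k + 1] :: nums.drop (k + 2))
    by_cases hle : nums[k + 1] ≤ nums[k]
    · simp [pvChain, hle]
    · have hrec : pvLoopA (PySem.List.pyRange (((k + 1 : Nat) : Int) + 1) (nums.length : Int) 1) nums
          = pvChain (nums.drop (k + 1)) := ih (k + 1) nums (by omega)
      have hc : ((k : Int) + 1 + 1) = (((k + 1 : Nat) : Int) + 1) := by push_cast; ring
      rw [if_neg hle, hc, hrec, hdk1]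
      simp [pvChain, hle]

-- A's result is the chain check on the filtered numbers list
lemma areNumbersAscending_eq_chain (s : String) :
    areNumbersAscending s = pvChain (pvNumbersA (PySem.Str.split₀ s)) := by
  show pvLoopA (PySem.List.pyRange 1 ((pvNumbersA (PySem.Str.split₀ s)).length : Int) 1)
        (pvNumbersA (PySem.Str.split₀ s)) = _
  have h := pvLoopA_drop ((pvNumbersA (PySem.Str.split₀ s)).length - 1) 0
      (pvNumbersA (PySem.Str.split₀ s)) (by omega)
  simpa using h

-- the appending loop is filter-then-map
lemma pvNumbersA_eq (words : List String) :
    pvNumbersA words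
      = (words.filter (fun w => PySem.Str.strIsdigit w)).map (fun w => (PySem.Int.ofStr? w).getD 0) := by
  unfold pvNumbersA
  rw [PySem.List.foldl_append_if]
  rw [List.nil_append]

-- the adjacent check is the strict chain predicate
lemma pvChain_iff (l : List Int) : pvChain l = true ↔ l.IsChain (· < ·) := by
  induction l with
  | nil => simp [pvChain]
  | cons x t ih =>
    cases t with
    | nil => simp [pvChain]
    | cons y t' =>
      have hstep : pvChain (x :: y :: t') = if y ≤ x then false else pvChain (y :: t') := rfl
      rw [hstep, List.isChain_cons_cons]
      by_cases h : y ≤ x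
      · simp [h, not_lt.mpr h]
      · simp [h, not_le.mp h, ih]

-- folding Set.add keeps a sublist of acc ++ xs
lemma foldl_add_sublist : ∀ (xs acc : List Int), (xs.foldl PySem.Set.add acc).Sublist (acc ++ xs) := by
  intro xs
  induction xs with
  | nil => intro acc; simp
  | cons x t ih =>
    intro acc
    have h1 : (t.foldl PySem.Set.add (PySem.Set.add acc x)).Sublist (PySem.Set.add acc x ++ t) := ih _
    have h2 : (PySem.Set.add acc x ++ t).Sublist (acc ++ x :: t) := by
      unfold PySem.Set.add
      split_ifs
      · exact List.Sublist.append (List.Sublist.refl acc) (List.sublist_cons_self x t)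
      · simp
    exact (List.foldl_cons .. ▸ h1).trans h2

-- len(set(nums)) == len(nums) forces distinct elements
lemma nodup_of_ofList_length (xs : List Int) (h : (PySem.Set.ofList xs).length = xs.length) :
    xs.Nodup := by
  have hsub : (PySem.Set.ofList xs).Sublist xs := by
    rw [PySem.Set.ofList_eq_foldl]
    simpa using foldl_add_sublist xs []
  have heq : PySem.Set.ofList xs = xs := hsub.eq_of_length h
  rw [← heq]
  exact PySem.Set.nodup_ofList xs

-- the adjacent check equals B's global order-and-distinctness check
lemma pvChain_eq_sorted (nums : List Int) :
    pvChain nums = (decide ((PySem.Set.ofList nums).length = nums.length) &&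
      decide (PySem.List.sorted nums (fun x => x) = nums)) := by
  rw [Bool.eq_iff_iff]
  simp only [Bool.and_eq_true, decide_eq_true_eq]
  rw [pvChain_iff]
  have hiff : nums.IsChain (· < ·) ↔ nums.Pairwise (· < ·) :=
    ⟨fun h => h.pairwise, fun h => h.isChain⟩
  rw [hiff]
  constructor
  · intro hlt
    have hnd : nums.Nodup := hlt.imp ne_of_lt
    constructor
    · rw [PySem.Set.ofList_eq_self_of_nodup nums hnd]
    · exact PySem.List.sorted_eq_self_of_pairwise nums _ (hlt.imp le_of_lt)
  · rintro ⟨hlen, hsort⟩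
    have hle : nums.Pairwise (fun a b => a ≤ b) := by
      have := PySem.List.sorted_pairwise nums (fun x => x)
      rwa [hsort] at this
    have hnd : nums.Nodup := nodup_of_ofList_length nums hlen
    exact (hle.and hnd).imp (fun ⟨h1, h2⟩ => lt_of_le_of_ne h1 h2)

-- ===== VERDICT (by name: the statement is the Claim_ definition above) =====
theorem areNumbersAscending_spec : Claim_equal_areNumbersAscending := by
  intro s _
  show areNumbersAscending s = areNumbersAscending_alt s
  rw [areNumbersAscending_eq_chain, pvNumbersA_eq, pvChain_eq_sorted]
  rfl
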